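-- pv_equiv track=rewrite | github.com/hades/aoc23 | aoc23/day22.py | _trace_brick
-- ===== SOURCE A (Python) =====
-- def _trace_brick(x0, y0, x1, y1):
--   if x0 == x1:
--     y0, y1 = min(y0, y1), max(y0, y1)
--     for y in range(y0, y1 + 1):
--       yield (x0, y)
--   elif y0 == y1:
--     x0, x1 = min(x0, x1), max(x0, x1)
--     for x in range(x0, x1 + 1):
--       yield (x, y0)
--   else:
--     raise ValueError(f'not a brick: {x0}, {y0}, {x1}, {y1}')
-- ===== SOURCE B (Python) =====
-- def _trace_brick(x0, y0, x1, y1):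
--   if x0 != x1 and y0 != y1:
--     raise ValueError(f'not a brick: {x0}, {y0}, {x1}, {y1}')
--   ax, ay = min((x0, y0), (x1, y1))
--   bx, by = max((x0, y0), (x1, y1))
--   dx, dy = int(ax < bx), int(ay < by)
--   x, y = ax, ay
--   while True:
--     yield (x, y)
--     if (x, y) == (bx, by):
--       break
--     x, y = x + dx, y + dy
-- ===== Notes on version B (the rewrite author's own statement) =====
-- stated objective: alternative
-- what changed: Replaces the two per-orientation range loops (with min/max tuple-swap per axis) by a single unit-step walk: sort the two endpoints lexicographically, derive a unit direction vector from boolean comparisons, and step from the smaller endpoint to the larger one in one while loop.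
-- outside the precondition, e.g. on _trace_brick(0, 0, 1, 2): A raises ValueError, B raises ValueError
import Mathlib
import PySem

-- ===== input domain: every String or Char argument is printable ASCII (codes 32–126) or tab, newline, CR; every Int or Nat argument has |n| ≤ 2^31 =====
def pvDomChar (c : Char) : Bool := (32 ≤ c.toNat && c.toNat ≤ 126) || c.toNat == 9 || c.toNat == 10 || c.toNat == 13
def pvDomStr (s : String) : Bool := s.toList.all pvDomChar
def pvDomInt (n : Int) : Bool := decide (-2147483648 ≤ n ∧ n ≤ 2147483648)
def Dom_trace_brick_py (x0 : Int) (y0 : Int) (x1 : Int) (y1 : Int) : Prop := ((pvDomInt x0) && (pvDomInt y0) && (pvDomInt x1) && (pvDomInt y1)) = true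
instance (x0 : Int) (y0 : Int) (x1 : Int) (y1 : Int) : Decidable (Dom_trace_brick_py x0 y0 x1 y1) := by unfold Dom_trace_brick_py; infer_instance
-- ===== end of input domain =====

-- B replaces A's two per-orientation range loops by one unit-step walk from the
-- lexicographically smaller endpoint to the larger one (objective: alternative).

-- ===== PORT A =====
def trace_brick_py (x0 : Int) (y0 : Int) (x1 : Int) (y1 : Int) : List (Int × Int) :=
  if x0 == x1 then
    let y0' := min y0 y1
    let y1' := max y0 y1
    (PySem.List.pyRange y0' (y1' + 1) 1).map (fun y => (x0, y))
  else if y0 == y1 then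
    let x0' := min x0 x1
    let x1' := max x0 x1
    (PySem.List.pyRange x0' (x1' + 1) 1).map (fun x => (x, y0))
  else
    []  -- raise ValueError: excluded by Pre_trace_brick_py

-- ===== PORT B =====
-- the Python 'while True' loop; fuel = Manhattan distance to the end point,
-- which is exactly the number of steps the loop takes before the break fires
-- (each step moves one unit toward (bx, yb) on admitted inputs)
def pvWalk (bx yb dx dy : Int) (fuel : Nat) (x y : Int) : List (Int × Int) :=
  if x = bx ∧ y = yb then [(x, y)]
  else
    match fuel with
    | 0 => [(x, y)]  -- unreachable on admitted inputs
    | n + 1 => (x, y) :: pvWalk bx yb dx dy n (x + dx) (y + dy)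

def trace_brick_py_alt (x0 : Int) (y0 : Int) (x1 : Int) (y1 : Int) : List (Int × Int) :=
  -- raise ValueError when x0 ≠ x1 ∧ y0 ≠ y1: excluded by Pre_trace_brick_py
  let swap := x1 < x0 ∨ (x1 = x0 ∧ y1 < y0)   -- tuple comparison in min/max
  let a := if swap then (x1, y1) else (x0, y0)  -- min((x0,y0),(x1,y1))
  let b := if swap then (x0, y0) else (x1, y1)  -- max((x0,y0),(x1,y1))
  let dx : Int := if a.1 < b.1 then 1 else 0
  let dy : Int := if a.2 < b.2 then 1 else 0
  pvWalk b.1 b.2 dx dy ((b.1 - a.1) + (b.2 - a.2)).toNat a.1 a.2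

-- ===== PRECONDITION & SPEC =====
-- A (and B) raise ValueError when neither coordinate pair matches.
def Pre_trace_brick_py (x0 : Int) (y0 : Int) (x1 : Int) (y1 : Int) : Prop := x0 = x1 ∨ y0 = y1
instance (x0 : Int) (y0 : Int) (x1 : Int) (y1 : Int) : Decidable (Pre_trace_brick_py x0 y0 x1 y1) := by unfold Pre_trace_brick_py; infer_instance
def pvWitness_trace_brick_py : Int × Int × Int × Int := (2, 0, 2, 3)
def Spec_trace_brick_py (x0 : Int) (y0 : Int) (x1 : Int) (y1 : Int) (out : List (Int × Int)) : Prop := out = trace_brick_py_alt x0 y0 x1 y1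
instance (x0 : Int) (y0 : Int) (x1 : Int) (y1 : Int) (out : List (Int × Int)) : Decidable (Spec_trace_brick_py x0 y0 x1 y1 out) := by unfold Spec_trace_brick_py; infer_instance

-- ===== CLAIM (what is proved, stated in full; the proofs are below) =====
def Claim_equal_trace_brick_py : Prop := ∀ (x0 : Int) (y0 : Int) (x1 : Int) (y1 : Int), Dom_trace_brick_py x0 y0 x1 y1 → Pre_trace_brick_py x0 y0 x1 y1 → Spec_trace_brick_py x0 y0 x1 y1 (trace_brick_py x0 y0 x1 y1)

-- ===== LEMMAS AND PROOFS =====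
theorem walk_vert (x : Int) : ∀ (n : Nat) (a : Int),
    pvWalk x (a + n) 0 1 n x a = (PySem.List.pyRange a (a + n + 1) 1).map (fun y => (x, y)) := by
  intro n
  induction n with
  | zero =>
    intro a
    rw [pvWalk, if_pos ⟨rfl, by omega⟩, PySem.List.pyRange_one]
    norm_num
  | succ n ih =>
    intro a
    rw [pvWalk, if_neg (by omega), PySem.List.pyRange_one_cons (by omega)]
    have h := ih (a + 1)
    simp only [List.map_cons, add_zero]
    rw [show (a + ((n + 1 : ℕ) : ℤ)) = (a + 1) + (n : ℤ) by push_cast; ring, h]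

theorem walk_horiz (y : Int) : ∀ (n : Nat) (a : Int),
    pvWalk (a + n) y 1 0 n a y = (PySem.List.pyRange a (a + n + 1) 1).map (fun x => (x, y)) := by
  intro n
  induction n with
  | zero =>
    intro a
    rw [pvWalk, if_pos ⟨by omega, rfl⟩, PySem.List.pyRange_one]
    norm_num
  | succ n ih =>
    intro a
    rw [pvWalk, if_neg (by omega), PySem.List.pyRange_one_cons (by omega)]
    have h := ih (a + 1)
    simp only [List.map_cons, add_zero]
    rw [show (a + ((n + 1 : ℕ) : ℤ)) = (a + 1) + (n : ℤ) by push_cast; ring, h]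

-- ===== VERDICT (by name: the statement is the Claim_ definition above) =====
theorem trace_brick_py_spec : Claim_equal_trace_brick_py := by
  intro x0 y0 x1 y1 _ hpre
  unfold Spec_trace_brick_py trace_brick_py trace_brick_py_alt
  dsimp only
  by_cases hx : x0 = x1
  · subst hx
    simp only [beq_self_eq_true, if_true, lt_self_iff_false, false_or, true_and]
    by_cases hy : y1 < y0
    · rw [if_pos hy, if_pos hy]
      simp only [lt_self_iff_false, if_false, if_pos hy]
      have hn : y0 = y1 + ((y0 - y1).toNat : Int) := by omega
      have := walk_vert x0 (y0 - y1).toNat y1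
      rw [← hn] at this
      rw [show ((x0 - x0) + (y0 - y1)).toNat = (y0 - y1).toNat by omega, this,
        min_eq_right (le_of_lt hy), max_eq_left (le_of_lt hy)]
    · rw [if_neg hy, if_neg hy]
      simp only [lt_self_iff_false, if_false]
      by_cases hlt : y0 < y1
      · rw [if_pos hlt]
        have hn : y1 = y0 + ((y1 - y0).toNat : Int) := by omega
        have := walk_vert x0 (y1 - y0).toNat y0
        rw [← hn] at this
        rw [show ((x0 - x0) + (y1 - y0)).toNat = (y1 - y0).toNat by omega, this,
          min_eq_left (le_of_lt hlt), max_eq_right (le_of_lt hlt)]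
      · have heq : y0 = y1 := by omega
        subst heq
        rw [if_neg hlt, min_self, max_self,
          show ((x0 - x0) + (y0 - y0)).toNat = 0 by omega]
        rw [pvWalk, if_pos ⟨rfl, rfl⟩, PySem.List.pyRange_one]
        norm_num
  · rcases hpre with h | hy
    · exact absurd h hx
    · subst hy
      rw [if_neg (by simpa using hx), if_pos (by simp)]
      by_cases hlt : x1 < x0
      · rw [if_pos (Or.inl hlt), if_pos (Or.inl hlt)]
        simp only [lt_self_iff_false, if_false]
        rw [if_pos hlt]
        have hn : x0 = x1 + ((x0 - x1).toNat : Int) := by omega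
        have := walk_horiz y0 (x0 - x1).toNat x1
        rw [← hn] at this
        rw [show ((x0 - x1) + (y0 - y0)).toNat = (x0 - x1).toNat by omega, this,
          min_eq_right (le_of_lt hlt), max_eq_left (le_of_lt hlt)]
      · have hlt' : x0 < x1 := by omega
        have hsw : ¬ (x1 < x0 ∨ (x1 = x0 ∧ y0 < y0)) := by
          rintro (h | ⟨h, _⟩); omega; exact hx h.symm
        rw [if_neg hsw, if_neg hsw]
        simp only [lt_self_iff_false, if_false]
        rw [if_pos hlt']
        have hn : x1 = x0 + ((x1 - x0).toNat : Int) := by omega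
        have := walk_horiz y0 (x1 - x0).toNat x0
        rw [← hn] at this
        rw [show ((x1 - x0) + (y0 - y0)).toNat = (x1 - x0).toNat by omega, this,
          min_eq_left (le_of_lt hlt'), max_eq_right (le_of_lt hlt')]
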